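-- pv_equiv track=rewrite | github.com/mikeakohn/mandelbrot_sse | msp430/software.py | umul16
-- ===== SOURCE A (Python) =====
-- def umul16(a, b):
--   is_negative = 0
--   total = 0
--
--   if (a & 0x8000) != 0:
--     a = (a ^ 0xffff) + 1
--     is_negative += 1
--
--   if (b & 0x8000) != 0:
--     b = (b ^ 0xffff) + 1
--     is_negative += 1
--
--   while b != 0:
--     if (b & 1) != 0: total += a
--
--     a = a << 1
--     b = b >> 1
--
--   total = (total >> 12) & 0xffff
--
--   if (is_negative & 1) == 1: total = (total ^ 0xffff) + 1
--
--   return total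
-- ===== SOURCE B (Python) =====
-- def umul16(a, b):
--   # B: direct closed-form product instead of the shift-add loop; same sign
--   # extraction and post-processing as the task demands.
--   neg = False
--
--   if a & 0x8000:
--     a = (a ^ 0xffff) + 1
--     neg = not neg
--
--   if b & 0x8000:
--     b = (b ^ 0xffff) + 1
--     neg = not neg
--
--   total = (a * b >> 12) & 0xffff
--   return (total ^ 0xffff) + 1 if neg else total
-- ===== Notes on version B (the rewrite author's own statement) =====
-- stated objective: simpler
-- what changed: The shift-add while loop accumulating partial products is replaced by one direct multiplication a*b on the already sign-normalised operands, keeping the identical >>12 & 0xffff post-processing and parity negation.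
import Mathlib
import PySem

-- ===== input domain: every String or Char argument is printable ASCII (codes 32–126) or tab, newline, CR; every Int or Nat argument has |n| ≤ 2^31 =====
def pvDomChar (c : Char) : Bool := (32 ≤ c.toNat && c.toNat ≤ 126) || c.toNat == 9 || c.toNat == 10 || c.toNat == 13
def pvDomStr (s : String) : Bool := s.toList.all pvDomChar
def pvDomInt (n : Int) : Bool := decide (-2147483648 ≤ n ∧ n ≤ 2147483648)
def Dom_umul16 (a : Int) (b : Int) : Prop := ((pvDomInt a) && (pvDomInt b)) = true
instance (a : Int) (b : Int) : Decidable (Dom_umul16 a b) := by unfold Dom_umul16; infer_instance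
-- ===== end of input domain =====

-- B replaces A's shift-add while loop with one direct multiplication of the
-- sign-normalised operands (same masking and parity negation); objective: simpler.


-- ===== PORT A =====
-- the while loop of A; the 'b ≤ 0' exit is a totality guard: Python exits at
-- b = 0, and under Pre_umul16 (0 ≤ b) b stays nonnegative throughout
def umul16Loop (a : Int) (b : Int) (total : Int) : Int :=
  if _h : b ≤ 0 then total
  else umul16Loop (a <<< (1:Nat)) (b >>> (1:Nat))
         (if PySem.Int.band b 1 ≠ 0 then total + a else total)
termination_by b.toNat
decreasing_by
  rw [Int.shiftRight_eq_div_pow]; omega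

def umul16 (a : Int) (b : Int) : Int :=
  let isNegative : Int := 0
  let total : Int := 0
  let a1 := if PySem.Int.band a 0x8000 ≠ 0 then (PySem.Int.bxor a 0xffff) + 1 else a
  let isNegative := if PySem.Int.band a 0x8000 ≠ 0 then isNegative + 1 else isNegative
  let b1 := if PySem.Int.band b 0x8000 ≠ 0 then (PySem.Int.bxor b 0xffff) + 1 else b
  let isNegative := if PySem.Int.band b 0x8000 ≠ 0 then isNegative + 1 else isNegative
  let total := umul16Loop a1 b1 total
  let total := PySem.Int.band (total >>> (12:Nat)) 0xffff
  if PySem.Int.band isNegative 1 = 1 then (PySem.Int.bxor total 0xffff) + 1 else total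

-- ===== PORT B =====
def umul16_alt (a : Int) (b : Int) : Int :=
  let neg : Bool := false
  let a1 := if PySem.Int.band a 0x8000 ≠ 0 then (PySem.Int.bxor a 0xffff) + 1 else a
  let neg := if PySem.Int.band a 0x8000 ≠ 0 then !neg else neg
  let b1 := if PySem.Int.band b 0x8000 ≠ 0 then (PySem.Int.bxor b 0xffff) + 1 else b
  let neg := if PySem.Int.band b 0x8000 ≠ 0 then !neg else neg
  let total := PySem.Int.band ((a1 * b1) >>> (12:Nat)) 0xffff
  if neg then (PySem.Int.bxor total 0xffff) + 1 else total

-- ===== PRECONDITION & SPEC =====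
-- Pre_ excludes b < 0, on which Python A never terminates (the while loop's
-- arithmetic right shift keeps a negative b negative forever).
def Pre_umul16 (a : Int) (b : Int) : Prop := 0 ≤ b
instance (a : Int) (b : Int) : Decidable (Pre_umul16 a b) := by unfold Pre_umul16; infer_instance
def pvWitness_umul16 : Int × Int := (40960, 8192)
def Spec_umul16 (a : Int) (b : Int) (out : Int) : Prop := out = umul16_alt a b
instance (a : Int) (b : Int) (out : Int) : Decidable (Spec_umul16 a b out) := by unfold Spec_umul16; infer_instance

-- ===== CLAIM (what is proved, stated in full; the proofs are below) =====
def Claim_equal_umul16 : Prop := ∀ (a : Int) (b : Int), Dom_umul16 a b → Pre_umul16 a b → Spec_umul16 a b (umul16 a b)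

-- ===== LEMMAS AND PROOFS =====

lemma umul16Loop_eq (n : Nat) : ∀ (a b total : Int), b.toNat ≤ n → 0 ≤ b →
    umul16Loop a b total = total + a * b := by
  induction n with
  | zero =>
    intro a b total hn hb
    rw [umul16Loop.eq_def]
    simp [show b ≤ 0 by omega, show b = 0 by omega]
  | succ n ih =>
    intro a b total hn hb
    rw [umul16Loop.eq_def]
    by_cases h0 : b ≤ 0
    · simp [h0, show b = 0 by omega]
    · simp only [h0, dite_false]
      have hsh : b >>> (1:Nat) = b / 2 := by
        rw [Int.shiftRight_eq_div_pow]; norm_num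
      have hb2 : (0:Int) ≤ b / 2 := by omega
      have hlt : (b >>> (1:Nat)).toNat ≤ n := by rw [hsh]; omega
      rw [ih _ _ _ hlt (hsh ▸ hb2)]
      have hband : PySem.Int.band b 1 = b % 2 := by
        rw [PySem.Int.band_one]; simp [pysem]
      rw [hsh, Int.shiftLeft_eq, hband]
      have := Int.emod_emod_of_dvd b (by norm_num : (2:Int) ∣ 2)
      have hsplit : b = 2 * (b / 2) + b % 2 := by omega
      by_cases hp : b % 2 = 0
      · simp only [hp, ne_eq, not_true_eq_false, if_false, ite_false]
        rw [hp] at hsplit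
        norm_num; linear_combination (-a) * hsplit
      · have hp1 : b % 2 = 1 := by omega
        simp only [hp1, ne_eq, one_ne_zero, not_false_iff, if_true, ite_true]
        rw [hp1] at hsplit
        norm_num; linear_combination (-a) * hsplit

lemma bxor_ffff_nonneg (b : Int) (hb : 0 ≤ b) : 0 ≤ PySem.Int.bxor b 0xffff := by
  rw [PySem.Int.bxor_of_nonneg hb (by norm_num)]; positivity

-- ===== VERDICT (by name: the statement is the Claim_ definition above) =====
theorem umul16_spec : Claim_equal_umul16 := by
  intro a b _hdom hb
  unfold Spec_umul16 umul16 umul16_alt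
  have key : ∀ (x y : Int), 0 ≤ y → umul16Loop x y 0 = x * y := by
    intro x y hy
    rw [umul16Loop_eq y.toNat x y 0 le_rfl hy]; ring
  by_cases ha15 : PySem.Int.band a 0x8000 ≠ 0 <;>
  by_cases hb15 : PySem.Int.band b 0x8000 ≠ 0 <;>
  simp only [ha15, hb15, if_true, if_false, ite_true, ite_false, not_true, not_false_iff,
    Bool.not_false, Bool.not_true, ite_not] <;>
  [skip; skip; skip; skip] <;>
  first
  | (rw [key _ _ (by have := bxor_ffff_nonneg b hb; omega)]; norm_num [PySem.Int.band])
  | (rw [key _ _ hb]; norm_num [PySem.Int.band])
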